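-- pv_equiv track=rewrite | github.com/renwei-release/dave | Tools/rpc/find/find_other_struct_table.py | _find_other_struct_use_in_msg_struct
-- ===== SOURCE A (Python) =====
-- def _find_other_struct_use_in_msg_struct(msg_struct_table, other_struct_table):
--     msg_type_list = {}
--     for struct_key in msg_struct_table:
--         msg_struct = msg_struct_table[struct_key]
--         for msg_member in msg_struct:
--             msg_type_list[msg_member['t']] = msg_member['t']
--
--     new_other_struct_table = {}
--     for key in other_struct_table.keys():
--         if msg_type_list.get(key, None) != None:
--             new_other_struct_table[key] = other_struct_table[key]
--
--     for Loop_multiple_times_to_get_nested_structures in range(6):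
--         msg_type_list = {}
--         for struct_key in new_other_struct_table:
--             msg_struct = new_other_struct_table[struct_key]
--             for msg_member in msg_struct:
--                 msg_type_list[msg_member['t']] = msg_member['t']
--
--         for key in other_struct_table.keys():
--             if msg_type_list.get(key, None) != None:
--                 new_other_struct_table[key] = other_struct_table[key]
--
--     return new_other_struct_table
-- ===== SOURCE B (Python) =====
-- def _find_other_struct_use_in_msg_struct(msg_struct_table, other_struct_table):
--     # Incremental frontier expansion (6 rounds, like the original's fixed depth),
--     # touching only newly added structs each round instead of rescanning the whole table.
--     seed_types = {m['t'] for members in msg_struct_table.values() for m in members}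
--     visited = [k for k in other_struct_table if k in seed_types]
--     seen = set(visited)
--     frontier = visited
--     for _ in range(6):
--         types = {m['t'] for k in frontier for m in other_struct_table[k]}
--         frontier = [k for k in other_struct_table if k in types and k not in seen]
--         seen.update(frontier)
--         visited = visited + frontier
--     return {k: other_struct_table[k] for k in visited}
-- ===== Notes on version B (the rewrite author's own statement) =====
-- stated objective: alternative
-- what changed: Replaces A's six full-table rescans (each rebuilding a type dict from the whole accumulated result and re-scanning every key of other_struct_table) with an incremental BFS-style frontier expansion: each of the 6 rounds collects member types of only the newly added structs and appends the not-yet-seen matching keys, building the result dict once at the end.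
-- outside the precondition, e.g. on _find_other_struct_use_in_msg_struct({}, {'a': [{}], 'b': [{'t': 'a'}]}): A returns {}, B returns {}
import Mathlib
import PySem

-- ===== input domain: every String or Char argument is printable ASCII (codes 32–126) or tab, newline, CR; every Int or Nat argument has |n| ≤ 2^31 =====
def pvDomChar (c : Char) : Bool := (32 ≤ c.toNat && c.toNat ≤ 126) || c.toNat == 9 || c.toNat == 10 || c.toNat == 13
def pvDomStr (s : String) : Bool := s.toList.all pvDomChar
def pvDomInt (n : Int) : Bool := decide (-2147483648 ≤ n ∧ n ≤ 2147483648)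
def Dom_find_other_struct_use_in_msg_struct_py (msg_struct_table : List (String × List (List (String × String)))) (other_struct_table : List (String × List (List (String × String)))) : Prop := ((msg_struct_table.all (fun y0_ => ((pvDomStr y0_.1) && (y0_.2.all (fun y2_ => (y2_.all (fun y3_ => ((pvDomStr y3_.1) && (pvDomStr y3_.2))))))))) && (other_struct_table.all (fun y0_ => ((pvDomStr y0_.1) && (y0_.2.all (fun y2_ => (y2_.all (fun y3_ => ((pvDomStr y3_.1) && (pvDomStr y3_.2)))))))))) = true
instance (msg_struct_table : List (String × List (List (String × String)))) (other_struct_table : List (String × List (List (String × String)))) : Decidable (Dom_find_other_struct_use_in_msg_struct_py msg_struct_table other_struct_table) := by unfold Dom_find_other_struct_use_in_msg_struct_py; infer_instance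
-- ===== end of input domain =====

-- B replaces A's six full-table rescans with an incremental frontier (BFS-level) expansion over the
-- same fixed 6 rounds; same return value, no speed claim (alternative decomposition).

-- ===== PORT A =====
-- A-side helpers
def pvTypesA (d : PySem.Dict String (List (List (String × String)))) : PySem.Dict String String :=
  d.items.foldl (fun acc e =>
    (d.getD e.1 []).foldl
      (fun a2 m => PySem.Dict.insert a2 ((PySem.Dict.mk m).getD "t" "") ((PySem.Dict.mk m).getD "t" "")) acc)
    PySem.Dict.empty

def pvRoundA (other : List (String × List (List (String × String)))) (T : PySem.Dict String String)
    (n : PySem.Dict String (List (List (String × String)))) : PySem.Dict String (List (List (String × String))) :=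
  (PySem.Dict.mk other).keys.foldl
    (fun nn k => if PySem.Dict.get? T k ≠ none then PySem.Dict.insert nn k ((PySem.Dict.mk other).getD k []) else nn) n

def find_other_struct_use_in_msg_struct_py (msg_struct_table : List (String × List (List (String × String)))) (other_struct_table : List (String × List (List (String × String)))) : List (String × List (List (String × String))) :=
  let new0 := pvRoundA other_struct_table (pvTypesA (PySem.Dict.mk msg_struct_table)) PySem.Dict.empty
  ((List.range 6).foldl (fun n _ => pvRoundA other_struct_table (pvTypesA n) n) new0).items

-- ===== PORT B =====
-- B-side helpers
def pvSeedTypesB (msg : List (String × List (List (String × String)))) : PySem.Set String :=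
  msg.foldl (fun s e => e.2.foldl (fun s2 m => PySem.Set.add s2 ((PySem.Dict.mk m).getD "t" "")) s) PySem.Set.empty

def pvTypesSetB (other : List (String × List (List (String × String)))) (ks : List String) : PySem.Set String :=
  ks.foldl (fun s k => ((PySem.Dict.mk other).getD k []).foldl (fun s2 m => PySem.Set.add s2 ((PySem.Dict.mk m).getD "t" "")) s) PySem.Set.empty

def pvStepB (other : List (String × List (List (String × String))))
    (st : List String × List String × PySem.Set String) : List String × List String × PySem.Set String :=
  let types := pvTypesSetB other st.2.1
  let f := (other.map Prod.fst).filter (fun k => PySem.Set.contains types k && !PySem.Set.contains st.2.2 k)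
  (st.1 ++ f, f, PySem.Set.update st.2.2 f)

def find_other_struct_use_in_msg_struct_py_alt (msg_struct_table : List (String × List (List (String × String)))) (other_struct_table : List (String × List (List (String × String)))) : List (String × List (List (String × String))) :=
  let visited0 := (other_struct_table.map Prod.fst).filter (fun k => PySem.Set.contains (pvSeedTypesB msg_struct_table) k)
  let st := (List.range 6).foldl (fun st _ => pvStepB other_struct_table st) (visited0, visited0, PySem.Set.ofList visited0)
  (st.1.foldl (fun d k => PySem.Dict.insert d k ((PySem.Dict.mk other_struct_table).getD k [])) PySem.Dict.empty).items

-- ===== PRECONDITION & SPEC =====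
-- every member type name occurring anywhere in either table: a closed-form over-approximation of the
-- struct keys A can ever reach (a key never named as a type is never scanned)
def pvAllTypeNames (msg_struct_table : List (String × List (List (String × String)))) (other_struct_table : List (String × List (List (String × String)))) : List String :=
  (msg_struct_table ++ other_struct_table).flatMap (fun e => e.2.filterMap (fun m => PySem.Dict.get? (PySem.Dict.mk m) "t"))

-- Pre_ excludes association lists with duplicate keys (a Python dict cannot carry them) and tables in
-- which a member dict that A may scan lacks the key 't' (A raises KeyError there): 't' is required in
-- every msg member and in the members of other-structs whose key occurs as a member type name at all.
def Pre_find_other_struct_use_in_msg_struct_py (msg_struct_table : List (String × List (List (String × String)))) (other_struct_table : List (String × List (List (String × String)))) : Prop :=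
  (msg_struct_table.map Prod.fst).Nodup ∧ (other_struct_table.map Prod.fst).Nodup ∧
  (∀ e ∈ msg_struct_table, ∀ m ∈ e.2, ((PySem.Dict.mk m).get? "t").isSome = true) ∧
  (∀ e ∈ other_struct_table, e.1 ∈ pvAllTypeNames msg_struct_table other_struct_table →
    ∀ m ∈ e.2, ((PySem.Dict.mk m).get? "t").isSome = true)
instance (msg_struct_table : List (String × List (List (String × String)))) (other_struct_table : List (String × List (List (String × String)))) : Decidable (Pre_find_other_struct_use_in_msg_struct_py msg_struct_table other_struct_table) := by unfold Pre_find_other_struct_use_in_msg_struct_py; infer_instance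
def pvWitness_find_other_struct_use_in_msg_struct_py : (List (String × List (List (String × String)))) × (List (String × List (List (String × String)))) :=
  ([("M", [[("t","S1")]])], [("S1", [[("t","S2")]]), ("S2", []), ("S3", [])])
def Spec_find_other_struct_use_in_msg_struct_py (msg_struct_table : List (String × List (List (String × String)))) (other_struct_table : List (String × List (List (String × String)))) (out : List (String × List (List (String × String)))) : Prop := out = find_other_struct_use_in_msg_struct_py_alt msg_struct_table other_struct_table
instance (msg_struct_table : List (String × List (List (String × String)))) (other_struct_table : List (String × List (List (String × String)))) (out : List (String × List (List (String × String)))) : Decidable (Spec_find_other_struct_use_in_msg_struct_py msg_struct_table other_struct_table out) := by unfold Spec_find_other_struct_use_in_msg_struct_py; infer_instance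

-- ===== CLAIM (what is proved, stated in full; the proofs are below) =====
def Claim_equal_find_other_struct_use_in_msg_struct_py : Prop := ∀ (msg_struct_table : List (String × List (List (String × String)))) (other_struct_table : List (String × List (List (String × String)))), Dom_find_other_struct_use_in_msg_struct_py msg_struct_table other_struct_table → Pre_find_other_struct_use_in_msg_struct_py msg_struct_table other_struct_table → Spec_find_other_struct_use_in_msg_struct_py msg_struct_table other_struct_table (find_other_struct_use_in_msg_struct_py msg_struct_table other_struct_table)

-- ===== LEMMAS AND PROOFS =====

-- proof-side abbreviations for the value and entry a key of other_struct_table carries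
def pvV (other : List (String × List (List (String × String)))) (k : String) : List (List (String × String)) :=
  (PySem.Dict.mk other).getD k []

def pvPair (other : List (String × List (List (String × String)))) (k : String) :
    String × List (List (String × String)) := (k, pvV other k)

-- the list of member types contributed by the structs named in ks
def pvTypesL (other : List (String × List (List (String × String)))) (ks : List String) : List String :=
  ks.flatMap (fun k => (pvV other k).map (fun m => (PySem.Dict.mk m).getD "t" ""))

lemma pv_get?_ne_none_iff {κ ν : Type} [BEq κ] [LawfulBEq κ] (d : PySem.Dict κ ν) (k : κ) :
    (PySem.Dict.get? d k ≠ none) ↔ k ∈ d.keys := by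
  rw [Ne, PySem.Dict.get?_eq_none_iff_not_mem_keys, not_not]

-- keys of A's nested insert-loop = everything ever inserted
lemma pv_mem_keys_outer_insert (d : PySem.Dict String (List (List (String × String)))) :
    ∀ (l : List (String × List (List (String × String)))) (acc : PySem.Dict String String) (x : String),
    (x ∈ (l.foldl (fun acc e => (d.getD e.1 []).foldl
        (fun a2 m => PySem.Dict.insert a2 ((PySem.Dict.mk m).getD "t" "") ((PySem.Dict.mk m).getD "t" "")) acc) acc).keys)
    ↔ (x ∈ acc.keys ∨ x ∈ l.flatMap (fun e => (d.getD e.1 []).map (fun m => (PySem.Dict.mk m).getD "t" ""))) := by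
  intro l
  induction l with
  | nil => intro acc x; simp
  | cons e t ih =>
    intro acc x
    rw [List.foldl_cons, ih]
    simp only [PySem.Dict.keys_foldl_insert_key, PySem.Set.mem_update,
      List.flatMap_cons, List.mem_append, List.mem_flatMap]
    tauto

lemma pv_mem_typesA (d : PySem.Dict String (List (List (String × String)))) (x : String) :
    (PySem.Dict.get? (pvTypesA d) x ≠ none)
    ↔ x ∈ d.items.flatMap (fun e => (d.getD e.1 []).map (fun m => (PySem.Dict.mk m).getD "t" "")) := by
  unfold pvTypesA
  rw [pv_get?_ne_none_iff]
  refine (pv_mem_keys_outer_insert d d.items PySem.Dict.empty x).trans ?_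
  simp [PySem.Dict.keys_empty]

-- membership in B's nested Set.add loop
lemma pv_mem_outer_add {α : Type} (g : α → List (List (String × String))) :
    ∀ (l : List α) (s : PySem.Set String) (x : String),
    (x ∈ l.foldl (fun s e => (g e).foldl
        (fun s2 m => PySem.Set.add s2 ((PySem.Dict.mk m).getD "t" "")) s) s)
    ↔ (x ∈ s ∨ x ∈ l.flatMap (fun e => (g e).map (fun m => (PySem.Dict.mk m).getD "t" ""))) := by
  intro l
  induction l with
  | nil => intro s x; simp
  | cons e t ih =>
    intro s x
    rw [List.foldl_cons, ih]
    have hinner : (g e).foldl (fun s2 m => PySem.Set.add s2 ((PySem.Dict.mk m).getD "t" "")) s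
        = PySem.Set.update s ((g e).map (fun m => (PySem.Dict.mk m).getD "t" "")) := by
      rw [PySem.Set.update, List.foldl_map]
    rw [hinner]
    simp only [PySem.Set.mem_update, List.flatMap_cons, List.mem_append, List.mem_flatMap]
    tauto

lemma pv_mem_seedB (msg : List (String × List (List (String × String)))) (x : String) :
    x ∈ pvSeedTypesB msg ↔ x ∈ msg.flatMap (fun e => e.2.map (fun m => (PySem.Dict.mk m).getD "t" "")) := by
  unfold pvSeedTypesB
  rw [pv_mem_outer_add (g := fun (e : String × List (List (String × String))) => e.2)]
  simp [PySem.Set.empty]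

lemma pv_mem_typesSetB (other : List (String × List (List (String × String)))) (ks : List String) (x : String) :
    x ∈ pvTypesSetB other ks ↔ x ∈ pvTypesL other ks := by
  unfold pvTypesSetB pvTypesL pvV
  rw [pv_mem_outer_add (g := fun k => (PySem.Dict.mk other).getD k [])]
  simp [PySem.Set.empty]

lemma pv_keys_mk_map_pair (other : List (String × List (List (String × String)))) (vis : List String) :
    (PySem.Dict.mk (vis.map (pvPair other))).keys = vis := by
  simp [PySem.Dict.keys, List.map_map, pvPair, Function.comp_def]

-- A's type dict over a table whose entries are (k, pvV other k) for k in a Nodup list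
lemma pv_typesA_of_table (other : List (String × List (List (String × String))))
    (vis : List String) (h : vis.Nodup) (x : String) :
    (PySem.Dict.get? (pvTypesA (PySem.Dict.mk (vis.map (pvPair other)))) x ≠ none)
    ↔ x ∈ pvTypesL other vis := by
  rw [pv_mem_typesA]
  have hnd : (PySem.Dict.mk (vis.map (pvPair other))).keys.Nodup := by
    rw [pv_keys_mk_map_pair]; exact h
  have hgetD : ∀ k ∈ vis, (PySem.Dict.mk (vis.map (pvPair other))).getD k [] = pvV other k := by
    intro k hk
    exact PySem.Dict.getD_of_mem_items (PySem.Dict.mk (vis.map (pvPair other)))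
      (show (k, pvV other k) ∈ vis.map (pvPair other) from List.mem_map_of_mem (f := pvPair other) hk) hnd []
  constructor
  · intro hx
    rcases List.mem_flatMap.mp hx with ⟨e, he, hme⟩
    rcases List.mem_map.mp he with ⟨k, hk, rfl⟩
    rw [show (pvPair other k).1 = k from rfl, hgetD k hk] at hme
    exact List.mem_flatMap.mpr ⟨k, hk, hme⟩
  · intro hx
    rcases List.mem_flatMap.mp hx with ⟨k, hk, hme⟩
    refine List.mem_flatMap.mpr ⟨pvPair other k, List.mem_map_of_mem hk, ?_⟩
    rw [show (pvPair other k).1 = k from rfl, hgetD k hk]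
    exact hme

-- inserting the pair of an already-present key is a no-op
lemma pv_insert_pair_mem (other : List (String × List (List (String × String))))
    (cs : List String) (k : String) (h : k ∈ cs) :
    PySem.Dict.insert (PySem.Dict.mk (cs.map (pvPair other))) k (pvV other k)
    = PySem.Dict.mk (cs.map (pvPair other)) := by
  apply PySem.Dict.ext
  have hc : (PySem.Dict.mk (cs.map (pvPair other))).contains k = true := by
    rw [PySem.Dict.contains_iff_mem_keys, pv_keys_mk_map_pair]
    exact h
  rw [PySem.Dict.items_insert_of_contains _ _ hc]
  show (cs.map (pvPair other)).map _ = cs.map (pvPair other)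
  rw [List.map_map]
  apply List.map_congr_left
  intro x hx
  by_cases hxk : x = k
  · subst hxk; simp [pvPair]
  · simp [pvPair, hxk]

lemma pv_insert_pair_not_mem (other : List (String × List (List (String × String))))
    (cs : List String) (k : String) (h : k ∉ cs) :
    PySem.Dict.insert (PySem.Dict.mk (cs.map (pvPair other))) k (pvV other k)
    = PySem.Dict.mk ((cs ++ [k]).map (pvPair other)) := by
  apply PySem.Dict.ext
  have hc : (PySem.Dict.mk (cs.map (pvPair other))).contains k = false := by
    rw [← Bool.not_eq_true, PySem.Dict.contains_iff_mem_keys, pv_keys_mk_map_pair]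
    exact h
  rw [PySem.Dict.items_insert_of_not_contains _ _ hc]
  simp [pvPair]

-- one full rescan round of A, from a faithful accumulator, appends the new matches
lemma pv_roundA_fold (other : List (String × List (List (String × String)))) (T : PySem.Dict String String) :
    ∀ (K cs : List String), K.Nodup →
    K.foldl (fun nn k => if PySem.Dict.get? T k ≠ none then PySem.Dict.insert nn k ((PySem.Dict.mk other).getD k []) else nn)
        (PySem.Dict.mk (cs.map (pvPair other)))
    = PySem.Dict.mk ((cs ++ K.filter (fun k => decide (PySem.Dict.get? T k ≠ none) && !cs.contains k)).map (pvPair other)) := by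
  intro K
  induction K with
  | nil => intro cs _; simp
  | cons k K' ih =>
    intro cs hnd
    have hk' : k ∉ K' := (List.nodup_cons.mp hnd).1
    have hnd' : K'.Nodup := (List.nodup_cons.mp hnd).2
    rw [List.foldl_cons]
    by_cases hT : PySem.Dict.get? T k ≠ none
    · by_cases hcs : k ∈ cs
      · rw [if_pos hT]
        rw [show ((PySem.Dict.mk other).getD k []) = pvV other k from rfl,
          pv_insert_pair_mem other cs k hcs, ih cs hnd']
        congr 2
        simp [hT, hcs, List.contains_eq_mem]
      · rw [if_pos hT]
        rw [show ((PySem.Dict.mk other).getD k []) = pvV other k from rfl,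
          pv_insert_pair_not_mem other cs k hcs, ih (cs ++ [k]) hnd']
        congr 2
        have hfilter : K'.filter (fun x => decide (PySem.Dict.get? T x ≠ none) && !(cs ++ [k]).contains x)
            = K'.filter (fun x => decide (PySem.Dict.get? T x ≠ none) && !cs.contains x) := by
          apply List.filter_congr
          intro x hx
          have hxk : x ≠ k := fun hh => hk' (hh ▸ hx)
          simp [List.contains_eq_mem, hxk]
        rw [hfilter]
        simp [hT, hcs, List.contains_eq_mem, List.append_assoc]
    · rw [if_neg hT, ih cs hnd']
      congr 2
      simp [hT]

lemma pv_roundA_eq (other : List (String × List (List (String × String)))) (T : PySem.Dict String String)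
    (cs : List String) (hK : (other.map Prod.fst).Nodup) :
    pvRoundA other T (PySem.Dict.mk (cs.map (pvPair other)))
    = PySem.Dict.mk ((cs ++ (other.map Prod.fst).filter
        (fun k => decide (PySem.Dict.get? T k ≠ none) && !cs.contains k)).map (pvPair other)) := by
  unfold pvRoundA
  have hkeys : (PySem.Dict.mk other).keys = other.map Prod.fst := by
    simp [PySem.Dict.keys]
  rw [hkeys]
  exact pv_roundA_fold other T (other.map Prod.fst) cs hK

-- the coupling invariant between A's accumulated dict and B's (visited, frontier, seen) state
def pvInv (other : List (String × List (List (String × String))))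
    (D : PySem.Dict String (List (List (String × String))))
    (st : List String × List String × PySem.Set String) : Prop :=
  ∃ prev, st.1 = prev ++ st.2.1
    ∧ D = PySem.Dict.mk (st.1.map (pvPair other))
    ∧ st.1.Nodup
    ∧ st.2.2 = st.1
    ∧ (∀ k ∈ other.map Prod.fst, k ∈ pvTypesL other prev → k ∈ st.1)

lemma pv_step_inv (other : List (String × List (List (String × String))))
    (hK : (other.map Prod.fst).Nodup)
    (D : PySem.Dict String (List (List (String × String))))
    (vis front : List String) (seen : PySem.Set String)
    (h : pvInv other D (vis, front, seen)) :
    pvInv other (pvRoundA other (pvTypesA D) D) (pvStepB other (vis, front, seen)) := by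
  obtain ⟨prev, hsplit', hD', hnd', hseen', hsat'⟩ := h
  replace hsplit' : vis = prev ++ front := hsplit'
  replace hD' : D = PySem.Dict.mk (vis.map (pvPair other)) := hD'
  replace hseen' : seen = vis := hseen'
  replace hnd' : vis.Nodup := hnd'
  replace hsat' : ∀ k ∈ other.map Prod.fst, k ∈ pvTypesL other prev → k ∈ vis := hsat'
  rw [hD', hseen']
  -- A's condition over the whole table equals B's condition over the frontier, off visited keys
  have hcond : ∀ k ∈ other.map Prod.fst,
      (decide (PySem.Dict.get? (pvTypesA (PySem.Dict.mk (vis.map (pvPair other)))) k ≠ none) && !vis.contains k)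
      = (PySem.Set.contains (pvTypesSetB other front) k && !PySem.Set.contains vis k) := by
    intro k hkK
    by_cases hv : k ∈ vis
    · simp [List.contains_eq_mem, hv, PySem.Set.contains_eq_listContains]
    · have hiff : (PySem.Dict.get? (pvTypesA (PySem.Dict.mk (vis.map (pvPair other)))) k ≠ none)
          ↔ k ∈ pvTypesL other front := by
        rw [pv_typesA_of_table other vis hnd']
        rw [hsplit']
        unfold pvTypesL
        rw [List.flatMap_append, List.mem_append]
        constructor
        · rintro (hp | hf)
          · rw [hsplit'] at hsat' hv
            exact absurd (hsat' k hkK hp) hv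
          · exact hf
        · exact Or.inr
      rw [← pv_mem_typesSetB] at hiff
      simp [List.contains_eq_mem, hv, PySem.Set.contains_eq_listContains, hiff]
  set f := (other.map Prod.fst).filter
      (fun k => PySem.Set.contains (pvTypesSetB other front) k && !PySem.Set.contains vis k) with hf
  have hstep : pvStepB other (vis, front, vis) = (vis ++ f, f, PySem.Set.update vis f) := rfl
  rw [hstep]
  have hfilter_eq : (other.map Prod.fst).filter
      (fun k => decide (PySem.Dict.get? (pvTypesA (PySem.Dict.mk (vis.map (pvPair other)))) k ≠ none) && !vis.contains k) = f := by
    rw [hf]; exact List.filter_congr hcond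
  have hfnd : f.Nodup := List.Nodup.filter _ hK
  have hfdisj : ∀ x ∈ f, x ∉ vis := by
    intro x hx
    have := (List.mem_filter.mp hx).2
    intro hv
    simp [PySem.Set.contains_eq_listContains, List.contains_eq_mem, hv] at this
  have hA : pvRoundA other (pvTypesA (PySem.Dict.mk (vis.map (pvPair other)))) (PySem.Dict.mk (vis.map (pvPair other)))
      = PySem.Dict.mk ((vis ++ f).map (pvPair other)) := by
    rw [pv_roundA_eq other _ vis hK, hfilter_eq]
  refine ⟨vis, rfl, by rw [hA], ?_, ?_, ?_⟩
  · exact List.Nodup.append hnd' hfnd (fun a ha hb => (hfdisj a hb) ha)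
  · exact PySem.Set.update_eq_append_of_disjoint _ _ hfnd hfdisj
  · -- saturation for the next round
    intro k hkK hkT
    show k ∈ vis ++ f
    unfold pvTypesL at hkT
    rw [hsplit', List.flatMap_append, List.mem_append] at hkT
    rcases hkT with hp | hfr
    · exact List.mem_append_left _ (hsat' k hkK hp)
    · by_cases hv : k ∈ vis
      · exact List.mem_append_left _ hv
      · refine List.mem_append_right _ ?_
        rw [hf]
        refine List.mem_filter.mpr ⟨hkK, ?_⟩
        have h1 : k ∈ pvTypesSetB other front := (pv_mem_typesSetB other front k).mpr hfr
        simp [PySem.Set.contains_eq_listContains, List.contains_eq_mem, h1, hv]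

lemma pv_iter_inv (other : List (String × List (List (String × String))))
    (hK : (other.map Prod.fst).Nodup) :
    ∀ (l : List ℕ) (D : PySem.Dict String (List (List (String × String))))
      (st : List String × List String × PySem.Set String),
    pvInv other D st →
    pvInv other (l.foldl (fun n _ => pvRoundA other (pvTypesA n) n) D)
      (l.foldl (fun s _ => pvStepB other s) st) := by
  intro l
  induction l with
  | nil => intro D st h; exact h
  | cons a t ih =>
    intro D st h
    rw [List.foldl_cons, List.foldl_cons]
    obtain ⟨vis, front, seen⟩ := st
    exact ih _ _ (pv_step_inv other hK D vis front seen h)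

-- the seed round: A's first pass equals B's visited0, with the empty invariant
lemma pv_base_inv (msg other : List (String × List (List (String × String))))
    (hM : (msg.map Prod.fst).Nodup) (hK : (other.map Prod.fst).Nodup) :
    pvInv other (pvRoundA other (pvTypesA (PySem.Dict.mk msg)) PySem.Dict.empty)
      (((other.map Prod.fst).filter (fun k => PySem.Set.contains (pvSeedTypesB msg) k)),
       ((other.map Prod.fst).filter (fun k => PySem.Set.contains (pvSeedTypesB msg) k)),
       PySem.Set.ofList ((other.map Prod.fst).filter (fun k => PySem.Set.contains (pvSeedTypesB msg) k))) := by
  have hMnd : (PySem.Dict.mk msg).keys.Nodup := by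
    simpa [PySem.Dict.keys] using hM
  -- A's seed condition ↔ B's seed set membership
  have hcond : ∀ k, (PySem.Dict.get? (pvTypesA (PySem.Dict.mk msg)) k ≠ none) ↔ k ∈ pvSeedTypesB msg := by
    intro k
    rw [pv_mem_typesA, pv_mem_seedB]
    constructor
    · intro hx
      rcases List.mem_flatMap.mp hx with ⟨e, he, hme⟩
      rw [PySem.Dict.getD_of_mem_items _ (show (e.1, e.2) ∈ (PySem.Dict.mk msg).items from he) hMnd []] at hme
      exact List.mem_flatMap.mpr ⟨e, he, hme⟩
    · intro hx
      rcases List.mem_flatMap.mp hx with ⟨e, he, hme⟩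
      refine List.mem_flatMap.mpr ⟨e, he, ?_⟩
      rw [PySem.Dict.getD_of_mem_items _ (show (e.1, e.2) ∈ (PySem.Dict.mk msg).items from he) hMnd []]
      exact hme
  set v0 := (other.map Prod.fst).filter (fun k => PySem.Set.contains (pvSeedTypesB msg) k) with hv0
  have hv0nd : v0.Nodup := List.Nodup.filter _ hK
  have hA : pvRoundA other (pvTypesA (PySem.Dict.mk msg)) PySem.Dict.empty
      = PySem.Dict.mk (v0.map (pvPair other)) := by
    rw [show (PySem.Dict.empty : PySem.Dict String (List (List (String × String))))
        = PySem.Dict.mk (([] : List String).map (pvPair other)) from rfl]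
    rw [pv_roundA_eq other _ [] hK]
    congr 2
    rw [hv0]
    apply List.filter_congr
    intro x hx
    simp [hcond x, PySem.Set.contains_eq_listContains, List.contains_eq_mem]
  refine ⟨[], by simp, by rw [hA], hv0nd, ?_, ?_⟩
  · exact PySem.Set.ofList_eq_self_of_nodup _ hv0nd
  · intro k hk hkT
    simp [pvTypesL] at hkT

lemma pv_output_eq (other : List (String × List (List (String × String))))
    (vis : List String) (hnd : vis.Nodup) :
    (vis.foldl (fun d k => PySem.Dict.insert d k ((PySem.Dict.mk other).getD k [])) PySem.Dict.empty).items
    = vis.map (pvPair other) := by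
  have h := PySem.Dict.items_foldl_insert_fresh vis (fun a => a)
    (fun a => (PySem.Dict.mk other).getD a []) PySem.Dict.empty
    (fun a _ => PySem.Dict.contains_empty a) (by simpa using hnd)
  simpa [pvPair, pvV, PySem.Dict.empty] using h

-- ===== VERDICT (by name: the statement is the Claim_ definition above) =====
theorem find_other_struct_use_in_msg_struct_py_spec : Claim_equal_find_other_struct_use_in_msg_struct_py := by
  intro msg other _hdom hpre
  obtain ⟨hM, hK, -, -⟩ := hpre
  show find_other_struct_use_in_msg_struct_py msg other = find_other_struct_use_in_msg_struct_py_alt msg other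
  have hbase := pv_base_inv msg other hM hK
  have hiter := pv_iter_inv other hK (List.range 6) _ _ hbase
  obtain ⟨prev, hsplit, hD, hnd, hseen, hsat⟩ := hiter
  set v0 := (other.map Prod.fst).filter (fun k => PySem.Set.contains (pvSeedTypesB msg) k) with hv0
  set stfin := (List.range 6).foldl (fun s _ => pvStepB other s) (v0, v0, PySem.Set.ofList v0) with hstfin
  replace hD : (List.range 6).foldl (fun n _ => pvRoundA other (pvTypesA n) n)
      (pvRoundA other (pvTypesA (PySem.Dict.mk msg)) PySem.Dict.empty)
      = PySem.Dict.mk (stfin.1.map (pvPair other)) := hD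
  replace hnd : stfin.1.Nodup := hnd
  have h1 : find_other_struct_use_in_msg_struct_py msg other
      = ((List.range 6).foldl (fun n _ => pvRoundA other (pvTypesA n) n)
        (pvRoundA other (pvTypesA (PySem.Dict.mk msg)) PySem.Dict.empty)).items := rfl
  have h2 : find_other_struct_use_in_msg_struct_py_alt msg other
      = (stfin.1.foldl (fun d k => PySem.Dict.insert d k ((PySem.Dict.mk other).getD k [])) PySem.Dict.empty).items := rfl
  rw [h1, h2, hD, pv_output_eq other stfin.1 hnd]
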